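-- pv_equiv track=rewrite | github.com/allanjakobi/project | accordion-rental/backend/myapp/serializers.py | calculate_white_keys
-- ===== SOURCE A (Python) =====
-- def calculate_white_keys(keys, low):
--     # Define the white/black key pattern
--     pattern = [1, 0, 1, 0, 1, 1, 0, 1, 0, 1, 0, 1]
--     offset = low % 12  # Calculate the starting offset in the pattern
--
--     white_keys_count = 0
--     i = 0  # Pattern index
--     key_count = 0  # Counter for keys to ensure we don't exceed total keys
--
--     # Loop through the pattern to count white keys
--     while key_count < keys:
--         shifted_i = (i + offset) % 12  # Calculate the current position in the pattern
--         white_keys_count += pattern[shifted_i]  # Add 1 if it's a white key (pattern[i] == 1)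
--         i += 1
--         key_count += 1
--
--     return white_keys_count
-- ===== SOURCE B (Python) =====
-- # Closed form: whites in [low, low+keys) = W(low+keys) - W(low), where
-- # W(x) = 7*(x//12) + cumulative white count within the octave. O(1) instead of O(keys).
-- _CUM = [0, 1, 1, 2, 2, 3, 4, 4, 5, 5, 6, 6]
--
-- def _whites_below(x):
--     # number of white keys at absolute positions 0..x-1 (signed count for negative x)
--     return 7 * (x // 12) + _CUM[x % 12]
--
-- def calculate_white_keys(keys, low):
--     if keys <= 0:
--         return 0
--     return _whites_below(low + keys) - _whites_below(low)
-- ===== Notes on version B (the rewrite author's own statement) =====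
-- stated objective: faster
-- what changed: Replaced the O(keys) loop over the 12-note pattern by a closed-form difference of two prefix counts W(x)=7*(x//12)+CUM[x%12], giving the answer in O(1).
import Mathlib
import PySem

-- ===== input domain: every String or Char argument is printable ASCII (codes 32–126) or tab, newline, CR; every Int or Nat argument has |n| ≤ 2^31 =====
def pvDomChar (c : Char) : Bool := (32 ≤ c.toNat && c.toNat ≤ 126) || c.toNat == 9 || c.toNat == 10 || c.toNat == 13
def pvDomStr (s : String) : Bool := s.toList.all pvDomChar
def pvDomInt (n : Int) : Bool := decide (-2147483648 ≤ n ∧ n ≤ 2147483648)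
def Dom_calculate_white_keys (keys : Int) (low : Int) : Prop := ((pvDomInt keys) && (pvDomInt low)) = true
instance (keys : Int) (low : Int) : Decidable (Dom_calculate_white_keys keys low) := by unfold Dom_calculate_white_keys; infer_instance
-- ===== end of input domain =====

-- B replaces A's O(keys) loop by a closed-form difference of octave prefix counts (O(1)); objective: faster.

-- ===== PORT A =====
def pvPattern : List Int := [1, 0, 1, 0, 1, 1, 0, 1, 0, 1, 0, 1]

-- the while loop: fuel = remaining iterations, i = pattern index, acc = white_keys_count
-- (pattern[shifted_i]: shifted_i is always in 0..11, so pyGetD with default 0 is exact)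
def pvLoopA (off : Int) : Nat → Int → Int → Int
  | 0, _, acc => acc
  | n + 1, i, acc =>
      pvLoopA off n (i + 1) (acc + PySem.List.pyGetD pvPattern (PySem.Int.mod (i + off) 12) 0)

def calculate_white_keys (keys : Int) (low : Int) : Int :=
  pvLoopA (PySem.Int.mod low 12) keys.toNat 0 0

-- ===== PORT B =====
def pvCum : List Int := [0, 1, 1, 2, 2, 3, 4, 4, 5, 5, 6, 6]

def pvWhitesBelow (x : Int) : Int :=
  7 * PySem.Int.floordiv x 12 + PySem.List.pyGetD pvCum (PySem.Int.mod x 12) 0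

def calculate_white_keys_alt (keys : Int) (low : Int) : Int :=
  if keys ≤ 0 then 0 else pvWhitesBelow (low + keys) - pvWhitesBelow low

-- ===== PRECONDITION & SPEC =====
def Spec_calculate_white_keys (keys : Int) (low : Int) (out : Int) : Prop := out = calculate_white_keys_alt keys low
instance (keys : Int) (low : Int) (out : Int) : Decidable (Spec_calculate_white_keys keys low out) := by unfold Spec_calculate_white_keys; infer_instance

-- ===== CLAIM (what is proved, stated in full; the proofs are below) =====
def Claim_equal_calculate_white_keys : Prop := ∀ (keys : Int) (low : Int), Dom_calculate_white_keys keys low → Spec_calculate_white_keys keys low (calculate_white_keys keys low)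

-- ===== LEMMAS AND PROOFS =====

-- W(x+1) = W(x) + pattern[x % 12]
lemma pvW_succ (x : Int) :
    pvWhitesBelow (x + 1) =
      pvWhitesBelow x + PySem.List.pyGetD pvPattern (PySem.Int.mod x 12) 0 := by
  unfold pvWhitesBelow
  rw [PySem.Int.floordiv_eq_ediv_of_pos (by norm_num), PySem.Int.floordiv_eq_ediv_of_pos (by norm_num),
      PySem.Int.mod_eq_emod_of_pos (by norm_num) (a := x + 1), PySem.Int.mod_eq_emod_of_pos (by norm_num) (a := x)]
  have hr : x % 12 = 0 ∨ x % 12 = 1 ∨ x % 12 = 2 ∨ x % 12 = 3 ∨ x % 12 = 4 ∨ x % 12 = 5 ∨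
      x % 12 = 6 ∨ x % 12 = 7 ∨ x % 12 = 8 ∨ x % 12 = 9 ∨ x % 12 = 10 ∨ x % 12 = 11 := by omega
  rcases hr with h|h|h|h|h|h|h|h|h|h|h|h <;>
    · have h1 : (x + 1) % 12 = (x % 12 + 1) % 12 := by omega
      have h2 : (x + 1) / 12 = if x % 12 = 11 then x / 12 + 1 else x / 12 := by
        split_ifs <;> omega
      rw [h1, h2]
      simp only [h]
      norm_num [pvCum, pvPattern, PySem.List.pyGetD, PySem.List.pyGet?, PySem.List.pyIdx?, Int.toNat]
      try omega

lemma pvLoopA_spec (low : Int) : ∀ (n : Nat) (i acc : Int),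
    pvLoopA (PySem.Int.mod low 12) n i acc =
      acc + (pvWhitesBelow (low + i + n) - pvWhitesBelow (low + i)) := by
  intro n
  induction n with
  | zero => intro i acc; simp [pvLoopA]
  | succ n ih =>
      intro i acc
      rw [pvLoopA, ih (i + 1)]
      have hmod : PySem.Int.mod (i + PySem.Int.mod low 12) 12 = PySem.Int.mod (low + i) 12 := by
        rw [PySem.Int.mod_eq_emod_of_pos (by norm_num) (a := low),
            PySem.Int.mod_eq_emod_of_pos (by norm_num) (a := i + low % 12),
            PySem.Int.mod_eq_emod_of_pos (by norm_num) (a := low + i)]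
        omega
      have hW := pvW_succ (low + i)
      rw [hmod]
      push_cast
      have : low + (i + 1) + (n : Int) = low + i + ((n : Int) + 1) := by ring
      rw [this]
      have e1 : low + (i + 1) = low + i + 1 := by ring
      rw [e1]
      omega

theorem pv_main (keys low : Int) :
    calculate_white_keys keys low = calculate_white_keys_alt keys low := by
  unfold calculate_white_keys calculate_white_keys_alt
  by_cases hk : keys ≤ 0
  · have : keys.toNat = 0 := by omega
    simp [this, pvLoopA, hk]
  · have hcast : ((keys.toNat : Int)) = keys := by omega
    rw [pvLoopA_spec low keys.toNat 0 0, hcast]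
    simp [hk]

-- ===== VERDICT (by name: the statement is the Claim_ definition above) =====
theorem calculate_white_keys_spec : Claim_equal_calculate_white_keys := by
  intro keys low _
  unfold Spec_calculate_white_keys
  exact pv_main keys low
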